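-- pv_equiv track=rewrite | github.com/Joao-Pedro-Queiroz/the_frank-s_musical_legacy-game | classes_personagens.py | player_facing
-- ===== SOURCE A (Python) =====
-- def player_facing(angle):
--     '''
--         Função que define a direção do rosto do jogador
--
--         parâmetro angle: representa o ângulo de visão do jogador
--         '''
--
--     angle = int(angle)
--
--     directions = {
--     'Forward-right': (22, 67),
--     'Forward': (67, 112),
--     'Forward-left': (112, 157),
--     'Left': (157, 202),
--     'Back-left': (202, 247),
--     'Back': (247, 292),
--     'Back-right': (292, 337),
--     'Right': (337, 22),
--     }
--
--     for direction, rng in directions.items():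
--         if angle in range(0, 22) or angle in range(337, 361):
--             return 'Right'
--         if angle in range(rng[0], rng[1]):
--             return direction
-- ===== SOURCE B (Python) =====
-- def player_facing(angle):
--     angle = int(angle)
--     if 0 <= angle <= 21 or 337 <= angle <= 360:
--         return 'Right'
--     if 22 <= angle <= 336:
--         return ['Forward-right', 'Forward', 'Forward-left', 'Left',
--                 'Back-left', 'Back', 'Back-right'][(angle - 22) // 45]
--     return None
-- ===== Notes on version B (the rewrite author's own statement) =====
-- stated objective: simpler
-- what changed: Replaced the dict-of-ranges scan (with a per-iteration Right re-check) by a closed-form arithmetic bucket: Right for 0..21 and 337..360, otherwise index a fixed list at (angle-22)//45 for 22..336, else None.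
import Mathlib
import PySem

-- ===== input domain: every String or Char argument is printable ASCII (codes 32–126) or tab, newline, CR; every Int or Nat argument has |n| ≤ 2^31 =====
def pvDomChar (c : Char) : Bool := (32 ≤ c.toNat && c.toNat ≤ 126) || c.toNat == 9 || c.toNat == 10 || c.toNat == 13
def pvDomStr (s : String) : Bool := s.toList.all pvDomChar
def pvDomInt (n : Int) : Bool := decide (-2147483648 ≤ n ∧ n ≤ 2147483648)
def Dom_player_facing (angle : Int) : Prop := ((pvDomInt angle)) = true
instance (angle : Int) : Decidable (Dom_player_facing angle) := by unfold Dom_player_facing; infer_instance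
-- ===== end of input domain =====

-- B replaces the dict-range scan by a closed-form arithmetic bucket (simpler).
-- ===== PORT A =====
def pvDirections : List (String × (Int × Int)) :=
  [("Forward-right", (22, 67)), ("Forward", (67, 112)), ("Forward-left", (112, 157)),
   ("Left", (157, 202)), ("Back-left", (202, 247)), ("Back", (247, 292)),
   ("Back-right", (292, 337)), ("Right", (337, 22))]

-- literal port of A's loop over the dict items (angle in range(a,b) ↔ a ≤ angle < b)
def pvLoopA (angle : Int) : List (String × (Int × Int)) → Option String
  | [] => none
  | (direction, rng) :: rest =>
    if (0 ≤ angle ∧ angle < 22) ∨ (337 ≤ angle ∧ angle < 361) then some "Right"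
    else if rng.1 ≤ angle ∧ angle < rng.2 then some direction
    else pvLoopA angle rest

def player_facing (angle : Int) : Option String := pvLoopA angle pvDirections

-- ===== PORT B =====
def pvLabels : List String :=
  ["Forward-right", "Forward", "Forward-left", "Left", "Back-left", "Back", "Back-right"]

def player_facing_alt (angle : Int) : Option String :=
  if (0 ≤ angle ∧ angle ≤ 21) ∨ (337 ≤ angle ∧ angle ≤ 360) then some "Right"
  else if 22 ≤ angle ∧ angle ≤ 336 then PySem.List.pyGet? pvLabels (PySem.Int.floordiv (angle - 22) 45)
  else none

-- ===== PRECONDITION & SPEC =====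
def Spec_player_facing (angle : Int) (out : Option String) : Prop := out = player_facing_alt angle
instance (angle : Int) (out : Option String) : Decidable (Spec_player_facing angle out) := by unfold Spec_player_facing; infer_instance

-- ===== CLAIM (what is proved, stated in full; the proofs are below) =====
def Claim_equal_player_facing : Prop := ∀ (angle : Int), Dom_player_facing angle → Spec_player_facing angle (player_facing angle)

-- ===== LEMMAS AND PROOFS =====

-- ===== VERDICT (by name: the statement is the Claim_ definition above) =====
theorem player_facing_spec : Claim_equal_player_facing := by
  intro angle _
  unfold Spec_player_facing player_facing player_facing_alt
  simp only [pvLoopA, pvDirections]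
  have he : PySem.Int.floordiv (angle - 22) 45 = (angle - 22) / 45 :=
    PySem.Int.floordiv_eq_ediv_of_pos (by norm_num)
  by_cases hR : (0 ≤ angle ∧ angle < 22) ∨ (337 ≤ angle ∧ angle < 361)
  · simp only [if_pos hR]
    rw [if_pos (show (0 ≤ angle ∧ angle ≤ 21) ∨ (337 ≤ angle ∧ angle ≤ 360) by omega)]
  · simp only [if_neg hR, he]
    by_cases hB : 22 ≤ angle ∧ angle ≤ 336
    · rw [if_neg (show ¬ ((0 ≤ angle ∧ angle ≤ 21) ∨ (337 ≤ angle ∧ angle ≤ 360)) by omega),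
         if_pos hB]
      split_ifs with h1 h2 h3 h4 h5 h6 h7 h8
      · rw [show (angle - 22) / 45 = 0 by omega]; rfl
      · rw [show (angle - 22) / 45 = 1 by omega]; rfl
      · rw [show (angle - 22) / 45 = 2 by omega]; rfl
      · rw [show (angle - 22) / 45 = 3 by omega]; rfl
      · rw [show (angle - 22) / 45 = 4 by omega]; rfl
      · rw [show (angle - 22) / 45 = 5 by omega]; rfl
      · rw [show (angle - 22) / 45 = 6 by omega]; rfl
      · exfalso; omega
      · exfalso; omega
    · rw [if_neg (show ¬ ((0 ≤ angle ∧ angle ≤ 21) ∨ (337 ≤ angle ∧ angle ≤ 360)) by omega),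
         if_neg hB]
      split_ifs <;> first | rfl | (exfalso; omega)
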